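-- pv_equiv track=rewrite | github.com/devjeetr/Re-assessing-automatic-evaluation-metrics-for-source-code-summarization-tasks | scripts/kendalls_tau.py | compute_rank_pair_type
-- ===== SOURCE A (Python) =====
-- import operator
-- from typing import Iterable, Literal, Tuple, Union
--
-- comparison_variant_b = [
--     (operator.lt, operator.lt, "c"),
--     (operator.lt, operator.eq, "t"),
--     (operator.lt, operator.gt, "d"),
--     (operator.gt, operator.lt, "d"),
--     (operator.gt, operator.eq, "t"),
--     (operator.gt, operator.gt, "c"),
-- ]
--
-- def compute_rank_pair_type(
--     human_ranking: Iterable[Union[int, float]],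
--     metric_ranking: Iterable[Union[int, float]],
-- ) -> Union[Literal["c"], Literal["d"], None]:
--     comparison_table = comparison_variant_b
--
--     for h_op, m_op, outcome in comparison_table:
--         if h_op(*human_ranking) and m_op(*metric_ranking):
--             return outcome
--
--     return "-"
-- ===== SOURCE B (Python) =====
-- def compute_rank_pair_type(human_ranking, metric_ranking):
--     h1, h2 = human_ranking
--     m1, m2 = metric_ranking
--     if h1 == h2:
--         return "-"
--     if m1 == m2:
--         return "t"
--     return "c" if (h1 < h2) == (m1 < m2) else "d"
-- ===== Notes on version B (the rewrite author's own statement) =====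
-- stated objective: simpler
-- what changed: Replaces the scan over the operator table with direct sign comparison: handle ties first, then return c/d according to whether the two comparison directions agree.
import Mathlib
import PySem

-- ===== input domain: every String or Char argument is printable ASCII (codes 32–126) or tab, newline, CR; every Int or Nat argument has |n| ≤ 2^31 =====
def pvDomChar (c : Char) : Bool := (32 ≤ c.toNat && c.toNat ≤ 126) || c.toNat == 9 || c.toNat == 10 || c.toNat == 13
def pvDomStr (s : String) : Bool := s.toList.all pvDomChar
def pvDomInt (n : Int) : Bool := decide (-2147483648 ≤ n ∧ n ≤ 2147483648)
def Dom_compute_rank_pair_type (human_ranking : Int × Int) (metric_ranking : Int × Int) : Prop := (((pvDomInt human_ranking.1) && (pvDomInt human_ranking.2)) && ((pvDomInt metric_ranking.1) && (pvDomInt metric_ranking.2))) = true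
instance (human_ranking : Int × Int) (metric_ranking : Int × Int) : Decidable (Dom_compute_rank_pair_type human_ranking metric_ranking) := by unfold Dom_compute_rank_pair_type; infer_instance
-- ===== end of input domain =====

-- B replaces A's scan over the operator table with tie-first direct sign comparison (objective: simpler).

-- ===== PORT A =====
-- the module-level operator table, as (human op, metric op, outcome) triples
def comparison_variant_b : List ((Int → Int → Bool) × (Int → Int → Bool) × String) :=
  [ (fun a b => a < b, fun a b => a < b, "c"),
    (fun a b => a < b, fun a b => a == b, "t"),
    (fun a b => a < b, fun a b => a > b, "d"),
    (fun a b => a > b, fun a b => a < b, "d"),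
    (fun a b => a > b, fun a b => a == b, "t"),
    (fun a b => a > b, fun a b => a > b, "c") ]

-- the for-loop with early return
def pvLoopA (table : List ((Int → Int → Bool) × (Int → Int → Bool) × String))
    (human_ranking metric_ranking : Int × Int) : String :=
  match table with
  | [] => "-"
  | (h_op, m_op, outcome) :: rest =>
      if h_op human_ranking.1 human_ranking.2 && m_op metric_ranking.1 metric_ranking.2 then outcome
      else pvLoopA rest human_ranking metric_ranking

def compute_rank_pair_type (human_ranking : Int × Int) (metric_ranking : Int × Int) : String :=
  pvLoopA comparison_variant_b human_ranking metric_ranking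

-- ===== PORT B =====
def compute_rank_pair_type_alt (human_ranking : Int × Int) (metric_ranking : Int × Int) : String :=
  let (h1, h2) := human_ranking
  let (m1, m2) := metric_ranking
  if h1 == h2 then "-"
  else if m1 == m2 then "t"
  else if (decide (h1 < h2)) == (decide (m1 < m2)) then "c" else "d"

-- ===== PRECONDITION & SPEC =====
def Spec_compute_rank_pair_type (human_ranking : Int × Int) (metric_ranking : Int × Int) (out : String) : Prop := out = compute_rank_pair_type_alt human_ranking metric_ranking
instance (human_ranking : Int × Int) (metric_ranking : Int × Int) (out : String) : Decidable (Spec_compute_rank_pair_type human_ranking metric_ranking out) := by unfold Spec_compute_rank_pair_type; infer_instance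

-- ===== CLAIM =====
def Claim_equal_compute_rank_pair_type : Prop := ∀ (human_ranking : Int × Int) (metric_ranking : Int × Int), Dom_compute_rank_pair_type human_ranking metric_ranking → Spec_compute_rank_pair_type human_ranking metric_ranking (compute_rank_pair_type human_ranking metric_ranking)

-- ===== LEMMAS AND PROOFS =====

-- ===== VERDICT =====
theorem compute_rank_pair_type_spec : Claim_equal_compute_rank_pair_type := by
  intro ⟨h1, h2⟩ ⟨m1, m2⟩ _
  unfold Spec_compute_rank_pair_type compute_rank_pair_type compute_rank_pair_type_alt
  simp only [comparison_variant_b, pvLoopA, Bool.and_eq_true, decide_eq_true_eq,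
    beq_iff_eq, decide_eq_decide, gt_iff_lt]
  split_ifs <;> first | rfl | omega
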